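-- pv_equiv track=rewrite | github.com/sigmajove/Sicherman2024 | sicherman2024.py | has_triangular_hole
-- ===== SOURCE A (Python) =====
-- NORTH = 0
--
-- NORTHWEST = 1
--
-- SOUTHWEST = 2
--
-- SOUTH = 3
--
-- SOUTHEAST = 4
--
-- NORTHEAST = 5
--
-- def points_up(x, y):
--     """Return whether the triangle at (x, y) is up-pointing."""
--     return (x + y) % 2 == 0
--
-- def adjacent(xy):
--     """Generate information about the three cells that are adjacent to xy.
--     For each adjacent cell, returns [(x, y), direction]
--     """
--     x, y = xy
--     if points_up(x, y):
--         yield [(x + 1, y), NORTHEAST]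
--         yield [(x - 1, y), NORTHWEST]
--         yield [(x, y + 1), SOUTH]
--     else:
--         yield [(x + 1, y), SOUTHEAST]
--         yield [(x - 1, y), SOUTHWEST]
--         yield [(x, y - 1), NORTH]
--
-- def has_triangular_hole(piece):
--     # Check for vacuous case.
--     if len(piece) == 0:
--         return False
--
--     surrounding = {}
--
--     # Use depth-first search to populate surrounding.
--     visited = set()
--     in_piece = set(p[0] for p in piece)
--     examine = {piece[0][0]}
--     while examine:
--         e = examine.pop()
--         visited.add(e)
--         for adj, _ in adjacent(e):
--             if adj in in_piece:
--                 if not adj in visited: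
--                     examine.add(adj)
--             else:
--                 new_val = surrounding.get(adj, 0) + 1
--                 if new_val >= 3:
--                     return True
--                 surrounding[adj] = new_val
--     return False
-- ===== SOURCE B (Python) =====
-- NORTH = 0
-- NORTHWEST = 1
-- SOUTHWEST = 2
-- SOUTH = 3
-- SOUTHEAST = 4
-- NORTHEAST = 5
--
--
-- def points_up(x, y):
--     return (x + y) % 2 == 0
--
--
-- def adjacent(xy):
--     x, y = xy
--     if points_up(x, y):
--         yield [(x + 1, y), NORTHEAST]
--         yield [(x - 1, y), NORTHWEST]
--         yield [(x, y + 1), SOUTH]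
--     else:
--         yield [(x + 1, y), SOUTHEAST]
--         yield [(x - 1, y), SOUTHWEST]
--         yield [(x, y - 1), NORTH]
--
--
-- def has_triangular_hole(piece):
--     """No worklist and no counting: the connected component of piece[0][0] is
--     computed as a round-based fixpoint (grow the whole set by one adjacency
--     layer, len(in_piece) times), and a hole is detected by the symmetric
--     criterion: some cell outside the piece has ALL THREE of its own
--     neighbours inside the component."""
--     if len(piece) == 0:
--         return False
--     in_piece = set(p[0] for p in piece)
--
--     comp = {piece[0][0]}
--     for _ in range(len(in_piece)):
--         grown = set(comp)
--         for cell in comp: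
--             for n, _ in adjacent(cell):
--                 if n in in_piece:
--                     grown.add(n)
--         comp = grown
--
--     for cell in comp:
--         for c, _ in adjacent(cell):
--             if c not in in_piece and all(n in comp for n, _ in adjacent(c)):
--                 return True
--     return False
-- ===== Notes on version B (the rewrite author's own statement) =====
-- stated objective: alternative
-- what changed: B drops A's worklist DFS with an interleaved surrounding-counter entirely: the connected component is computed as a round-based set fixpoint (grow the whole set by one adjacency layer, repeated len(in_piece) times, with no stack/frontier/visited bookkeeping), and the hole test uses the symmetric criterion 'some cell outside the piece has all three of its own neighbours inside the component' instead of counting, per outside cell, how many component cells border it.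
import Mathlib
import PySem

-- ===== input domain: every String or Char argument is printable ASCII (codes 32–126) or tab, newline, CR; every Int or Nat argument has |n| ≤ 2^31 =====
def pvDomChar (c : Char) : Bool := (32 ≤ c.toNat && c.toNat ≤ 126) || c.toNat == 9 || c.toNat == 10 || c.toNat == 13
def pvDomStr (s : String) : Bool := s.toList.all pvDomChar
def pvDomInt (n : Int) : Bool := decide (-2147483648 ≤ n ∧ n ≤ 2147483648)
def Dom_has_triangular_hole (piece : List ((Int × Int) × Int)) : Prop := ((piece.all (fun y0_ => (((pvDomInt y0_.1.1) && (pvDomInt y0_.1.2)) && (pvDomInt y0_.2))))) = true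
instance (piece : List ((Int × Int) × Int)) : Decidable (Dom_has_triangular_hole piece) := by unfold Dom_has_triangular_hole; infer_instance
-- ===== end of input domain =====

-- B replaces A's worklist DFS + interleaved surrounding-counter by a round-based set fixpoint
-- (grow the whole component by one adjacency layer, n times) and the symmetric hole test
-- "some outside cell has all three of its own neighbours in the component"
-- (objective: alternative algorithm, not speed).


-- ===== PORT A =====
def NORTH : Int := 0
def NORTHWEST : Int := 1
def SOUTHWEST : Int := 2
def SOUTH : Int := 3
def SOUTHEAST : Int := 4
def NORTHEAST : Int := 5

def points_up (x y : Int) : Bool := PySem.Int.mod (x + y) 2 == 0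

def adjacent (xy : Int × Int) : List ((Int × Int) × Int) :=
  if points_up xy.1 xy.2 then
    [((xy.1 + 1, xy.2), NORTHEAST), ((xy.1 - 1, xy.2), NORTHWEST), ((xy.1, xy.2 + 1), SOUTH)]
  else
    [((xy.1 + 1, xy.2), SOUTHEAST), ((xy.1 - 1, xy.2), SOUTHWEST), ((xy.1, xy.2 - 1), NORTH)]

-- the body of A's 'for adj, _ in adjacent(e)' loop: threads (examine, surrounding), 'none' = early 'return True'
def hthScan (in_piece visited : PySem.Set (Int × Int)) :
    List ((Int × Int) × Int) → PySem.Set (Int × Int) → PySem.Dict (Int × Int) Int →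
    Option (PySem.Set (Int × Int) × PySem.Dict (Int × Int) Int)
  | [], examine, surrounding => some (examine, surrounding)
  | (adj, _) :: rest, examine, surrounding =>
    if in_piece.contains adj then
      hthScan in_piece visited rest (if visited.contains adj then examine else examine.add adj) surrounding
    else
      let new_val := surrounding.getD adj 0 + 1
      if 3 ≤ new_val then none
      else hthScan in_piece visited rest examine (surrounding.insert adj new_val)

-- A's 'while examine' loop (fuel is only a totality guard: each iteration visits a fresh in_piece cell)
def hthLoop (in_piece : PySem.Set (Int × Int)) :
    Nat → PySem.Set (Int × Int) → PySem.Set (Int × Int) → PySem.Dict (Int × Int) Int → Bool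
  | 0, _, _, _ => false
  | fuel + 1, visited, examine, surrounding =>
    match examine with
    | [] => false
    | e :: rest =>
      let visited' := visited.add e
      match hthScan in_piece visited' (adjacent e) rest surrounding with
      | none => true
      | some (examine', surrounding') => hthLoop in_piece fuel visited' examine' surrounding'

def has_triangular_hole (piece : List ((Int × Int) × Int)) : Bool :=
  match piece with
  | [] => false
  | p0 :: _ =>
    let in_piece : PySem.Set (Int × Int) := PySem.Set.ofList (piece.map Prod.fst)
    hthLoop in_piece (in_piece.length + 1) PySem.Set.empty (PySem.Set.add PySem.Set.empty p0.1) PySem.Dict.empty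

-- ===== PORT B =====
-- B's inner 'for n, _ in adjacent(cell): if n in in_piece: grown.add(n)'
def growCell (inp g : PySem.Set (Int × Int)) (cell : Int × Int) : PySem.Set (Int × Int) :=
  (adjacent cell).foldl (fun g p => if inp.contains p.1 then PySem.Set.add g p.1 else g) g

-- one round of B: 'grown = set(comp); for cell in comp: …; comp = grown'
def growB (inp comp : PySem.Set (Int × Int)) : PySem.Set (Int × Int) :=
  comp.foldl (growCell inp) comp

-- B's 'for _ in range(len(in_piece))' fixpoint loop
def iterGrowB (inp : PySem.Set (Int × Int)) : Nat → PySem.Set (Int × Int) → PySem.Set (Int × Int)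
  | 0, comp => comp
  | k + 1, comp => iterGrowB inp k (growB inp comp)

def has_triangular_hole_alt (piece : List ((Int × Int) × Int)) : Bool :=
  match piece with
  | [] => false
  | p0 :: _ =>
    let inp : PySem.Set (Int × Int) := PySem.Set.ofList (piece.map Prod.fst)
    let comp := iterGrowB inp inp.length (PySem.Set.add PySem.Set.empty p0.1)
    comp.any (fun cell => (adjacent cell).any (fun p =>
      !inp.contains p.1 && (adjacent p.1).all (fun q => comp.contains q.1)))

-- ===== PRECONDITION & SPEC =====
def Spec_has_triangular_hole (piece : List ((Int × Int) × Int)) (out : Bool) : Prop := out = has_triangular_hole_alt piece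
instance (piece : List ((Int × Int) × Int)) (out : Bool) : Decidable (Spec_has_triangular_hole piece out) := by unfold Spec_has_triangular_hole; infer_instance

-- ===== CLAIM (what is proved, stated in full; the proofs are below) =====
def Claim_equal_has_triangular_hole : Prop := ∀ (piece : List ((Int × Int) × Int)), Dom_has_triangular_hole piece → Spec_has_triangular_hole piece (has_triangular_hole piece)

-- ===== LEMMAS AND PROOFS =====

-- neighbour cells of a cell, and the number of cells of V that have c as an outside neighbour
def nbrsHT (c : Int × Int) : List (Int × Int) := (adjacent c).map Prod.fst
def cntHT (inp V : List (Int × Int)) (c : Int × Int) : Nat :=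
  V.countP (fun v => decide (c ∈ nbrsHT v ∧ c ∉ inp))
-- adjacency reachability inside inp
def ReachHT (inp : List (Int × Int)) (u v : Int × Int) : Prop :=
  Relation.ReflTransGen (fun a b => b ∈ nbrsHT a ∧ b ∈ inp) u v
-- the examine-set update one iteration of A's while-loop performs
def exUpd (in_piece visited : PySem.Set (Int × Int)) (L : List ((Int × Int) × Int))
    (ex : PySem.Set (Int × Int)) : PySem.Set (Int × Int) :=
  L.foldl (fun ex p =>
    if in_piece.contains p.1 then (if visited.contains p.1 then ex else ex.add p.1) else ex) ex
-- the bare traversal of A's while-loop (counting stripped)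
def travA (in_piece : PySem.Set (Int × Int)) :
    Nat → PySem.Set (Int × Int) → PySem.Set (Int × Int) → List (Int × Int)
  | 0, V, _ => V
  | _ + 1, V, [] => V
  | fuel + 1, V, e :: rest => travA in_piece fuel (V.add e) (exUpd in_piece (V.add e) (adjacent e) rest)

-- structural invariant of A's worklist state
def InvT (inp V E : List (Int × Int)) : Prop :=
  V.Nodup ∧ E.Nodup ∧ (∀ x ∈ E, x ∈ inp) ∧ (∀ x ∈ E, x ∉ V) ∧ (∀ x ∈ V, x ∈ inp) ∧
  (∀ u ∈ V, ∀ v, v ∈ nbrsHT u → v ∈ inp → v ∈ V ∨ v ∈ E)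
-- invariant of A's surrounding dict
def InvS (inp V : List (Int × Int)) (s : PySem.Dict (Int × Int) Int) : Prop :=
  (∀ c, c ∉ inp → s.getD c 0 = (cntHT inp V c : Int)) ∧ (∀ c, c ∉ inp → cntHT inp V c < 3)

theorem nodup_nbrsHT (c : Int × Int) : (nbrsHT c).Nodup := by
  simp [nbrsHT, adjacent]
  split <;> simp [Prod.ext_iff] <;> omega
theorem filter_step (inp V : List (Int × Int)) (e : Int × Int) (he : e ∈ inp) (hv : e ∉ V) :
    (inp.filter (fun x => decide (x ∉ V ++ [e]))).length + 1 ≤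
      (inp.filter (fun x => decide (x ∉ V))).length := by
  have h1 : inp.filter (fun x => decide (x ∉ V ++ [e]))
      = (inp.filter (fun x => decide (x ∉ V))).filter (fun x => decide (x ≠ e)) := by
    rw [List.filter_filter]
    apply List.filter_congr
    intro x _
    by_cases h : x ∈ V <;> by_cases h2 : x = e <;> simp [h, h2]
  have he2 : e ∈ inp.filter (fun x => decide (x ∉ V)) := by simp [hv, he]
  have := List.length_filter_lt_length_iff_exists (l := inp.filter (fun x => decide (x ∉ V)))
    (p := fun x => decide (x ≠ e))
  rw [h1]
  have hlt : ((inp.filter (fun x => decide (x ∉ V))).filter (fun x => decide (x ≠ e))).length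
      < (inp.filter (fun x => decide (x ∉ V))).length := by
    rw [this]; exact ⟨e, he2, by simp⟩
  omega
theorem reach_closed (inp S : List (Int × Int))
    (hS : ∀ u ∈ S, ∀ v, v ∈ nbrsHT u → v ∈ inp → v ∈ S)
    (u x : Int × Int) (hu : u ∈ S) (h : ReachHT inp u x) : x ∈ S := by
  induction h with
  | refl => exact hu
  | tail _ hstep ih => exact hS _ ih _ hstep.1 hstep.2
theorem add_eq_append (s : PySem.Set (Int × Int)) (x : Int × Int) (h : x ∉ s) :
    s.add x = s ++ [x] := by
  simp [PySem.Set.add, PySem.Set.contains, h]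

theorem mem_exUpd (inp V' : PySem.Set (Int × Int)) (L : List ((Int × Int) × Int))
    (ex : PySem.Set (Int × Int)) (x : Int × Int) :
    x ∈ exUpd inp V' L ex ↔ x ∈ ex ∨ (x ∈ L.map Prod.fst ∧ x ∈ inp ∧ x ∉ V') := by
  induction L generalizing ex with
  | nil => simp [exUpd]
  | cons p rest ih =>
    simp only [exUpd, List.foldl_cons] at *
    rw [ih]
    by_cases hx : x = p.1
    · subst hx
      by_cases h1 : inp.contains p.1 <;> by_cases h2 : V'.contains p.1 <;>
        simp_all [PySem.Set.contains, PySem.Set.mem_add]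
    · by_cases h1 : inp.contains p.1 <;> by_cases h2 : V'.contains p.1 <;>
        simp_all [PySem.Set.contains, PySem.Set.mem_add]
theorem nodup_exUpd (inp V' : PySem.Set (Int × Int)) (L : List ((Int × Int) × Int))
    (ex : PySem.Set (Int × Int)) (h : ex.Nodup) : (exUpd inp V' L ex).Nodup := by
  induction L generalizing ex with
  | nil => simpa [exUpd]
  | cons p rest ih =>
    simp only [exUpd, List.foldl_cons] at *
    split <;> [skip; exact ih _ h]
    split <;> [exact ih _ h; exact ih _ (PySem.Set.nodup_add _ _ h)]
theorem scan_ex (inp V' : PySem.Set (Int × Int)) :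
    ∀ (L : List ((Int × Int) × Int)) ex s ex' s',
      hthScan inp V' L ex s = some (ex', s') → ex' = exUpd inp V' L ex := by
  intro L
  induction L with
  | nil => intro ex s ex' s' h; simp [hthScan] at h; simp [exUpd, h.1]
  | cons p rest ih =>
    intro ex s ex' s' h
    obtain ⟨adj, d⟩ := p
    by_cases hc : inp.contains adj
    · have hm : adj ∈ inp := by simpa [PySem.Set.contains] using hc
      simp only [hthScan, if_pos hc] at h
      have he : exUpd inp V' ((adj, d) :: rest) ex
          = exUpd inp V' rest (if V'.contains adj = true then ex else ex.add adj) := by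
        simp [exUpd, PySem.Set.contains, hm]
      rw [he]; exact ih _ _ _ _ h
    · have hm : adj ∉ inp := by simpa [PySem.Set.contains] using hc
      simp only [hthScan] at h
      rw [if_neg hc] at h
      have he : exUpd inp V' ((adj, d) :: rest) ex = exUpd inp V' rest ex := by
        simp [exUpd, PySem.Set.contains, hm]
      rw [he]
      split at h
      · exact absurd h (by simp)
      · exact ih _ _ _ _ h

theorem scan_cons_in (inp V' : PySem.Set (Int × Int)) (adj : Int × Int) (d : Int)
    (rest : List ((Int × Int) × Int)) (ex : PySem.Set (Int × Int)) (s : PySem.Dict (Int × Int) Int)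
    (hc : inp.contains adj = true) :
    hthScan inp V' ((adj, d) :: rest) ex s
      = hthScan inp V' rest (if V'.contains adj = true then ex else ex.add adj) s := by
  simp [hthScan]
  intro h; exact absurd (by simpa [PySem.Set.contains] using hc) h

theorem scan_cons_out (inp V' : PySem.Set (Int × Int)) (adj : Int × Int) (d : Int)
    (rest : List ((Int × Int) × Int)) (ex : PySem.Set (Int × Int)) (s : PySem.Dict (Int × Int) Int)
    (hc : inp.contains adj = false) :
    hthScan inp V' ((adj, d) :: rest) ex s
      = if (3 : Int) ≤ s.getD adj 0 + 1 then none
        else hthScan inp V' rest ex (s.insert adj (s.getD adj 0 + 1)) := by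
  simp [hthScan]
  intro h; exact absurd h (by simpa [PySem.Set.contains] using hc)

theorem scan_none_iff (inp V' : PySem.Set (Int × Int)) :
    ∀ (L : List ((Int × Int) × Int)) ex s, (L.map Prod.fst).Nodup →
      (hthScan inp V' L ex s = none ↔
        ∃ c ∈ L.map Prod.fst, c ∉ inp ∧ (3 : Int) ≤ s.getD c 0 + 1) := by
  intro L
  induction L with
  | nil => intro ex s _; simp [hthScan]
  | cons p rest ih =>
    intro ex s hnd
    obtain ⟨adj, d⟩ := p
    simp only [List.map_cons, List.nodup_cons] at hnd
    obtain ⟨hadj, hndr⟩ := hnd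
    by_cases hc : inp.contains adj
    · have hm : adj ∈ inp := by simpa [PySem.Set.contains] using hc
      rw [scan_cons_in inp V' adj d rest ex s hc, ih _ _ hndr]
      constructor
      · rintro ⟨c, hcm, hcn, hle⟩; exact ⟨c, by simp [hcm], hcn, hle⟩
      · rintro ⟨c, hcm, hcn, hle⟩
        simp only [List.map_cons, List.mem_cons] at hcm
        rcases hcm with rfl | hcm
        · exact absurd hm hcn
        · exact ⟨c, hcm, hcn, hle⟩
    · have hm : adj ∉ inp := by simpa [PySem.Set.contains] using hc
      rw [scan_cons_out inp V' adj d rest ex s (by simpa using hc)]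
      by_cases h3 : (3 : Int) ≤ s.getD adj 0 + 1
      · rw [if_pos h3]
        constructor
        · intro _; exact ⟨adj, by simp, hm, h3⟩
        · intro _; rfl
      · rw [if_neg h3, ih _ _ hndr]
        constructor
        · rintro ⟨c, hcm, hcn, hle⟩
          have hne : c ≠ adj := fun h => hadj (h ▸ hcm)
          rw [PySem.Dict.getD_insert_of_ne _ _ _ hne] at hle
          exact ⟨c, by simp [hcm], hcn, hle⟩
        · rintro ⟨c, hcm, hcn, hle⟩
          simp only [List.map_cons, List.mem_cons] at hcm
          rcases hcm with rfl | hcm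
          · exact absurd hle h3
          · have hne : c ≠ adj := fun h => hadj (h ▸ hcm)
            exact ⟨c, hcm, hcn, by rwa [PySem.Dict.getD_insert_of_ne _ _ _ hne]⟩

theorem scan_getD (inp V' : PySem.Set (Int × Int)) :
    ∀ (L : List ((Int × Int) × Int)) ex s ex' s', (L.map Prod.fst).Nodup →
      hthScan inp V' L ex s = some (ex', s') →
      ∀ c, c ∉ inp → s'.getD c 0 = s.getD c 0 + (if c ∈ L.map Prod.fst then 1 else 0) := by
  intro L
  induction L with
  | nil => intro ex s ex' s' _ h c _; simp [hthScan] at h; simp [h.2]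
  | cons p rest ih =>
    intro ex s ex' s' hnd h c hcn
    obtain ⟨adj, d⟩ := p
    simp only [List.map_cons, List.nodup_cons] at hnd
    obtain ⟨hadj, hndr⟩ := hnd
    by_cases hc : inp.contains adj
    · have hm : adj ∈ inp := by simpa [PySem.Set.contains] using hc
      rw [scan_cons_in inp V' adj d rest ex s hc] at h
      have hne : c ≠ adj := fun he => hcn (he ▸ hm)
      rw [ih _ _ _ _ hndr h c hcn]
      by_cases hr : c ∈ List.map Prod.fst rest <;> simp [hr, hne]
    · rw [scan_cons_out inp V' adj d rest ex s (by simpa using hc)] at h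
      split at h
      · exact absurd h (by simp)
      · rw [ih _ _ _ _ hndr h c hcn]
        by_cases hce : c = adj
        · subst hce
          have hnm : c ∉ (rest.map Prod.fst) := hadj
          simp [hnm, PySem.Dict.getD_insert_self]
        · rw [PySem.Dict.getD_insert_of_ne _ _ _ hce]
          by_cases hr : c ∈ List.map Prod.fst rest <;> simp [hr, hce]

theorem stepA_inv (inp V : PySem.Set (Int × Int)) (e : Int × Int) (rest : List (Int × Int))
    (h : InvT inp V (e :: rest)) :
    InvT inp (PySem.Set.add V e) (exUpd inp (PySem.Set.add V e) (adjacent e) rest) := by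
  obtain ⟨hVnd, hEnd, hEinp, hEV, hVinp, hclose⟩ := h
  have heV : e ∉ V := hEV e (List.mem_cons_self)
  have heinp : e ∈ inp := hEinp e (List.mem_cons_self)
  have hrest : rest.Nodup ∧ e ∉ rest := by
    rw [List.nodup_cons] at hEnd; exact ⟨hEnd.2, hEnd.1⟩
  have hadd : PySem.Set.add V e = V ++ [e] := add_eq_append V e heV
  have hmemadd : ∀ x, x ∈ PySem.Set.add V e ↔ x ∈ V ∨ x = e := fun x => PySem.Set.mem_add V e x
  have hmemE' : ∀ x, x ∈ exUpd inp (PySem.Set.add V e) (adjacent e) rest ↔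
      x ∈ rest ∨ (x ∈ nbrsHT e ∧ x ∈ inp ∧ x ∉ PySem.Set.add V e) := fun x =>
    mem_exUpd inp (PySem.Set.add V e) (adjacent e) rest x
  refine ⟨?_, ?_, ?_, ?_, ?_, ?_⟩
  · rw [hadd]
    refine List.Nodup.append hVnd (List.nodup_singleton e) ?_
    simp [List.disjoint_singleton, heV]
  · exact nodup_exUpd inp (PySem.Set.add V e) (adjacent e) rest hrest.1
  · intro x hx
    rcases (hmemE' x).mp hx with hx | hx
    · exact hEinp x (List.mem_cons_of_mem _ hx)
    · exact hx.2.1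
  · intro x hx
    rcases (hmemE' x).mp hx with hx | hx
    · intro hmem
      rcases (hmemadd x).mp hmem with hv | he
      · exact hEV x (List.mem_cons_of_mem _ hx) hv
      · exact hrest.2 (he ▸ hx)
    · exact hx.2.2
  · intro x hx
    rcases (hmemadd x).mp hx with hv | he
    · exact hVinp x hv
    · exact he ▸ heinp
  · intro u hu v hvn hvi
    rcases (hmemadd u).mp hu with hu | rfl
    · rcases hclose u hu v hvn hvi with hv | hv
      · exact Or.inl ((hmemadd v).mpr (Or.inl hv))
      · rcases List.mem_cons.mp hv with rfl | hv
        · exact Or.inl ((hmemadd v).mpr (Or.inr rfl))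
        · exact Or.inr ((hmemE' v).mpr (Or.inl hv))
    · by_cases hvV : v ∈ PySem.Set.add V u
      · exact Or.inl hvV
      · exact Or.inr ((hmemE' v).mpr (Or.inr ⟨hvn, hvi, hvV⟩))

theorem travA_prefix (inp : PySem.Set (Int × Int)) :
    ∀ fuel V E, InvT inp V E → V <+: travA inp fuel V E := by
  intro fuel
  induction fuel with
  | zero => intro V E _; exact List.prefix_refl V
  | succ fuel ih =>
    intro V E h
    match E with
    | [] => exact List.prefix_refl V
    | e :: rest =>
      have h' := stepA_inv inp V e rest h
      have hadd : PySem.Set.add V e = V ++ [e] :=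
        add_eq_append V e (h.2.2.2.1 e List.mem_cons_self)
      refine List.IsPrefix.trans ?_ (ih _ _ h')
      rw [hadd]; exact List.prefix_append V [e]

theorem travA_nodup (inp : PySem.Set (Int × Int)) :
    ∀ fuel V E, InvT inp V E → (travA inp fuel V E).Nodup := by
  intro fuel
  induction fuel with
  | zero => intro V E h; exact h.1
  | succ fuel ih =>
    intro V E h
    match E with
    | [] => exact h.1
    | e :: rest => exact ih _ _ (stepA_inv inp V e rest h)

theorem travA_subset_reach (inp : PySem.Set (Int × Int)) :
    ∀ fuel V E, InvT inp V E →
      ∀ x ∈ travA inp fuel V E, x ∈ V ∨ ∃ e ∈ E, ReachHT inp e x := by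
  intro fuel
  induction fuel with
  | zero => intro V E _ x hx; exact Or.inl hx
  | succ fuel ih =>
    intro V E h
    match E with
    | [] => exact fun x hx => Or.inl hx
    | e :: rest =>
      intro x hx
      have h' := stepA_inv inp V e rest h
      rcases ih _ _ h' x hx with hx | ⟨a, ha, hr⟩
      · rcases (PySem.Set.mem_add V e x).mp hx with hx | rfl
        · exact Or.inl hx
        · exact Or.inr ⟨x, List.mem_cons_self, Relation.ReflTransGen.refl⟩
      · rcases (mem_exUpd inp (PySem.Set.add V e) (adjacent e) rest a).mp ha with ha | ⟨han, hai, _⟩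
        · exact Or.inr ⟨a, List.mem_cons_of_mem _ ha, hr⟩
        · exact Or.inr ⟨e, List.mem_cons_self, Relation.ReflTransGen.head ⟨han, hai⟩ hr⟩

theorem travA_supset (inp : PySem.Set (Int × Int)) :
    ∀ fuel V E, InvT inp V E →
      (inp.filter (fun x => decide (x ∉ V))).length < fuel →
      ∀ x ∈ E, x ∈ travA inp fuel V E := by
  intro fuel
  induction fuel with
  | zero => intro V E _ hf; omega
  | succ fuel ih =>
    intro V E h hf
    match E with
    | [] => intro x hx; cases hx
    | e :: rest =>
      intro x hx
      have h' := stepA_inv inp V e rest h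
      have heV : e ∉ V := h.2.2.2.1 e List.mem_cons_self
      have heinp : e ∈ inp := h.2.2.1 e List.mem_cons_self
      have hadd : PySem.Set.add V e = V ++ [e] := add_eq_append V e heV
      have hf' : (inp.filter (fun x => decide (x ∉ PySem.Set.add V e))).length < fuel := by
        have := filter_step inp V e heinp heV
        rw [hadd]; omega
      rcases List.mem_cons.mp hx with rfl | hx
      · have hpre := travA_prefix inp fuel _ _ h'
        exact hpre.subset ((PySem.Set.mem_add V x x).mpr (Or.inr rfl))
      · exact ih _ _ h' hf' x
          ((mem_exUpd inp (PySem.Set.add V e) (adjacent e) rest x).mpr (Or.inl hx))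

theorem travA_closed (inp : PySem.Set (Int × Int)) :
    ∀ fuel V E, InvT inp V E →
      (inp.filter (fun x => decide (x ∉ V))).length < fuel →
      ∀ u ∈ travA inp fuel V E, ∀ v, v ∈ nbrsHT u → v ∈ inp → v ∈ travA inp fuel V E := by
  intro fuel
  induction fuel with
  | zero => intro V E _ hf; omega
  | succ fuel ih =>
    intro V E h hf
    match E with
    | [] =>
      intro u hu v hvn hvi
      rcases h.2.2.2.2.2 u hu v hvn hvi with hv | hv
      · exact hv
      · cases hv
    | e :: rest =>
      have h' := stepA_inv inp V e rest h
      have heV : e ∉ V := h.2.2.2.1 e List.mem_cons_self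
      have heinp : e ∈ inp := h.2.2.1 e List.mem_cons_self
      have hadd : PySem.Set.add V e = V ++ [e] := add_eq_append V e heV
      have hf' : (inp.filter (fun x => decide (x ∉ PySem.Set.add V e))).length < fuel := by
        have := filter_step inp V e heinp heV
        rw [hadd]; omega
      exact ih _ _ h' hf'

theorem travA_mem (inp : PySem.Set (Int × Int)) :
    ∀ fuel V E, InvT inp V E →
      (inp.filter (fun x => decide (x ∉ V))).length < fuel →
      ∀ x, x ∈ travA inp fuel V E ↔ x ∈ V ∨ ∃ e ∈ E, ReachHT inp e x := by
  intro fuel V E h hf x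
  constructor
  · exact travA_subset_reach inp fuel V E h x
  · rintro (hx | ⟨a, ha, hr⟩)
    · exact (travA_prefix inp fuel V E h).subset hx
    · exact reach_closed inp _ (travA_closed inp fuel V E h hf)
        a x (travA_supset inp fuel V E h hf a ha) hr

theorem cnt_append_singleton (inp V : List (Int × Int)) (e c : Int × Int) :
    cntHT inp (V ++ [e]) c = cntHT inp V c + (if c ∈ nbrsHT e ∧ c ∉ inp then 1 else 0) := by
  simp [cntHT, List.countP_append, List.countP_cons]

theorem loopA_true_iff (inp : PySem.Set (Int × Int)) :
    ∀ fuel V E s, InvT inp V E → InvS inp V s →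
      (inp.filter (fun x => decide (x ∉ V))).length < fuel →
      (hthLoop inp fuel V E s = true ↔
        ∃ c, c ∉ inp ∧ 3 ≤ cntHT inp (travA inp fuel V E) c) := by
  intro fuel
  induction fuel with
  | zero => intro V E s _ _ hf; omega
  | succ fuel ih =>
    intro V E s hT hS hf
    match E with
    | [] =>
      simp only [hthLoop, travA]
      constructor
      · intro h; cases h
      · rintro ⟨c, hcn, hc3⟩
        have := hS.2 c hcn
        omega
    | e :: rest =>
      have hT' := stepA_inv inp V e rest hT
      have heV : e ∉ V := hT.2.2.2.1 e List.mem_cons_self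
      have heinp : e ∈ inp := hT.2.2.1 e List.mem_cons_self
      have hadd : PySem.Set.add V e = V ++ [e] := add_eq_append V e heV
      have hf' : (inp.filter (fun x => decide (x ∉ PySem.Set.add V e))).length < fuel := by
        have := filter_step inp V e heinp heV
        rw [hadd]; omega
      have hnd : ((adjacent e).map Prod.fst).Nodup := nodup_nbrsHT e
      have hcntV' : ∀ c, c ∉ inp →
          cntHT inp (PySem.Set.add V e) c
            = cntHT inp V c + (if c ∈ nbrsHT e then 1 else 0) := by
        intro c hcn
        rw [hadd, cnt_append_singleton]
        by_cases hcm : c ∈ nbrsHT e <;> simp [hcm, hcn]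
      have htrav : travA inp (fuel + 1) V (e :: rest)
          = travA inp fuel (PySem.Set.add V e) (exUpd inp (PySem.Set.add V e) (adjacent e) rest) := rfl
      simp only [hthLoop]
      cases hscan : hthScan inp (PySem.Set.add V e) (adjacent e) rest s with
      | none =>
        simp only [htrav]
        rcases (scan_none_iff inp (PySem.Set.add V e) (adjacent e) rest s hnd).mp hscan
          with ⟨c, hcm, hcn, hle⟩
        have hcv : s.getD c 0 = (cntHT inp V c : Int) := hS.1 c hcn
        have h3 : 3 ≤ cntHT inp (PySem.Set.add V e) c := by
          rw [hcntV' c hcn]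
          have : c ∈ nbrsHT e := hcm
          simp only [this, if_pos]
          omega
        have hsub : cntHT inp (PySem.Set.add V e) c ≤ cntHT inp (travA inp fuel (PySem.Set.add V e) (exUpd inp (PySem.Set.add V e) (adjacent e) rest)) c := by
          have hpre := travA_prefix inp fuel _ _ hT'
          exact hpre.sublist.countP_le
        constructor
        · intro _; exact ⟨c, hcn, le_trans h3 hsub⟩
        · intro _
          trivial
      | some p =>
        obtain ⟨ex', s'⟩ := p
        have hex : ex' = exUpd inp (PySem.Set.add V e) (adjacent e) rest := by
          exact scan_ex inp (PySem.Set.add V e) (adjacent e) rest s ex' s' hscan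
        have hgd := scan_getD inp (PySem.Set.add V e) (adjacent e) rest s ex' s' hnd hscan
        have hS' : InvS inp (PySem.Set.add V e) s' := by
          constructor
          · intro c hcn
            rw [hgd c hcn, hS.1 c hcn, hcntV' c hcn]
            by_cases hcm : c ∈ nbrsHT e
            · rw [if_pos (show c ∈ (adjacent e).map Prod.fst from hcm), if_pos hcm]
              push_cast; ring
            · rw [if_neg (show c ∉ (adjacent e).map Prod.fst from hcm), if_neg hcm]
              push_cast; ring
          · intro c hcn
            rw [hcntV' c hcn]
            by_cases hcm : c ∈ nbrsHT e
            · by_contra hge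
              have h3 : (3:Int) ≤ s.getD c 0 + 1 := by
                rw [hS.1 c hcn]
                have : 3 ≤ cntHT inp V c + 1 := by simp [hcm] at hge; omega
                exact_mod_cast this
              have : hthScan inp (PySem.Set.add V e) (adjacent e) rest s = none :=
                (scan_none_iff inp (PySem.Set.add V e) (adjacent e) rest s hnd).mpr
                  ⟨c, hcm, hcn, h3⟩
              rw [this] at hscan; cases hscan
            · have := hS.2 c hcn
              simp [hcm]; omega
        rw [hex]
        exact ih (PySem.Set.add V e) _ s' hT' hS' hf'

-- ===== B-side lemmas =====

theorem adjacent_eq (c : Int × Int) :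
    adjacent c = if (c.1 + c.2) % 2 = 0 then
        [((c.1 + 1, c.2), NORTHEAST), ((c.1 - 1, c.2), NORTHWEST), ((c.1, c.2 + 1), SOUTH)]
      else
        [((c.1 + 1, c.2), SOUTHEAST), ((c.1 - 1, c.2), SOUTHWEST), ((c.1, c.2 - 1), NORTH)] := by
  have hm : PySem.Int.mod (c.1 + c.2) 2 = (c.1 + c.2) % 2 :=
    PySem.Int.mod_eq_emod_of_pos (by norm_num)
  by_cases h : (c.1 + c.2) % 2 = 0 <;> simp [adjacent, points_up, hm, h]

theorem nbr_symm (u v : Int × Int) : v ∈ nbrsHT u ↔ u ∈ nbrsHT v := by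
  suffices h : ∀ a b : Int × Int, b ∈ nbrsHT a → a ∈ nbrsHT b from ⟨h u v, h v u⟩
  rintro ⟨x, y⟩ ⟨a, b⟩ hv
  simp only [nbrsHT, adjacent_eq] at hv ⊢
  by_cases h : (x + y) % 2 = 0
  · rw [if_pos h] at hv
    simp only [List.map_cons, List.map_nil, List.mem_cons, List.not_mem_nil, or_false,
      Prod.ext_iff] at hv
    rcases hv with ⟨ha, hb⟩ | ⟨ha, hb⟩ | ⟨ha, hb⟩ <;> subst ha <;> subst hb <;>
      rw [if_neg (by omega)] <;> simp [Prod.ext_iff] <;> omega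
  · rw [if_neg h] at hv
    simp only [List.map_cons, List.map_nil, List.mem_cons, List.not_mem_nil, or_false,
      Prod.ext_iff] at hv
    rcases hv with ⟨ha, hb⟩ | ⟨ha, hb⟩ | ⟨ha, hb⟩ <;> subst ha <;> subst hb <;>
      rw [if_pos (by omega)] <;> simp [Prod.ext_iff] <;> omega

-- inner fold of growCell over an arbitrary list
theorem mem_growFold (inp : PySem.Set (Int × Int)) (L : List ((Int × Int) × Int)) :
    ∀ (g : PySem.Set (Int × Int)) (x : Int × Int),
      x ∈ L.foldl (fun g p => if inp.contains p.1 then PySem.Set.add g p.1 else g) g ↔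
        x ∈ g ∨ (x ∈ L.map Prod.fst ∧ x ∈ inp) := by
  induction L with
  | nil => intro g x; simp
  | cons p rest ih =>
    intro g x
    simp only [List.foldl_cons]
    rw [ih]
    by_cases hx : x = p.1
    · subst hx
      by_cases h1 : inp.contains p.1 <;> simp_all [PySem.Set.contains, PySem.Set.mem_add]
    · by_cases h1 : inp.contains p.1 <;> simp_all [PySem.Set.contains, PySem.Set.mem_add]

theorem nodup_growFold (inp : PySem.Set (Int × Int)) (L : List ((Int × Int) × Int)) :
    ∀ (g : PySem.Set (Int × Int)), g.Nodup →
      (L.foldl (fun g p => if inp.contains p.1 then PySem.Set.add g p.1 else g) g).Nodup := by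
  induction L with
  | nil => intro g h; simpa
  | cons p rest ih =>
    intro g h
    simp only [List.foldl_cons]
    split
    · exact ih _ (PySem.Set.nodup_add _ _ h)
    · exact ih _ h

theorem prefix_growFold (inp : PySem.Set (Int × Int)) (L : List ((Int × Int) × Int)) :
    ∀ (g : PySem.Set (Int × Int)),
      g <+: L.foldl (fun g p => if inp.contains p.1 then PySem.Set.add g p.1 else g) g := by
  induction L with
  | nil => intro g; exact List.prefix_refl g
  | cons p rest ih =>
    intro g
    simp only [List.foldl_cons]
    split
    · refine List.IsPrefix.trans ?_ (ih _)
      by_cases h : p.1 ∈ g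
      · simp [PySem.Set.add, PySem.Set.contains, h]
      · rw [add_eq_append g p.1 h]; exact List.prefix_append g [p.1]
    · exact ih g

theorem mem_growCells (inp : PySem.Set (Int × Int)) (cells : List (Int × Int)) :
    ∀ (g : PySem.Set (Int × Int)) (x : Int × Int),
      x ∈ cells.foldl (growCell inp) g ↔
        x ∈ g ∨ ∃ cell ∈ cells, x ∈ nbrsHT cell ∧ x ∈ inp := by
  induction cells with
  | nil => intro g x; simp
  | cons cell rest ih =>
    intro g x
    simp only [List.foldl_cons]
    rw [ih, growCell, mem_growFold]
    constructor
    · rintro ((hx | ⟨hn, hi⟩) | ⟨c, hc, hn, hi⟩)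
      · exact Or.inl hx
      · exact Or.inr ⟨cell, List.mem_cons_self, hn, hi⟩
      · exact Or.inr ⟨c, List.mem_cons_of_mem _ hc, hn, hi⟩
    · rintro (hx | ⟨c, hc, hn, hi⟩)
      · exact Or.inl (Or.inl hx)
      · rcases List.mem_cons.mp hc with rfl | hc
        · exact Or.inl (Or.inr ⟨hn, hi⟩)
        · exact Or.inr ⟨c, hc, hn, hi⟩

theorem nodup_growCells (inp : PySem.Set (Int × Int)) (cells : List (Int × Int)) :
    ∀ (g : PySem.Set (Int × Int)), g.Nodup → (cells.foldl (growCell inp) g).Nodup := by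
  induction cells with
  | nil => intro g h; simpa
  | cons cell rest ih =>
    intro g h
    exact ih _ (nodup_growFold inp (adjacent cell) g h)

theorem prefix_growCells (inp : PySem.Set (Int × Int)) (cells : List (Int × Int)) :
    ∀ (g : PySem.Set (Int × Int)), g <+: cells.foldl (growCell inp) g := by
  induction cells with
  | nil => intro g; exact List.prefix_refl g
  | cons cell rest ih =>
    intro g
    exact List.IsPrefix.trans (prefix_growFold inp (adjacent cell) g) (ih _)

theorem mem_growB (inp comp : PySem.Set (Int × Int)) (x : Int × Int) :
    x ∈ growB inp comp ↔ x ∈ comp ∨ ∃ cell ∈ comp, x ∈ nbrsHT cell ∧ x ∈ inp :=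
  mem_growCells inp comp comp x

theorem nodup_growB (inp comp : PySem.Set (Int × Int)) (h : comp.Nodup) : (growB inp comp).Nodup :=
  nodup_growCells inp comp comp h

theorem prefix_growB (inp comp : PySem.Set (Int × Int)) : comp <+: growB inp comp :=
  prefix_growCells inp comp comp

theorem subset_growB (inp comp : PySem.Set (Int × Int)) (h : ∀ x ∈ comp, x ∈ inp) :
    ∀ x ∈ growB inp comp, x ∈ inp := by
  intro x hx
  rcases (mem_growB inp comp x).mp hx with hx | ⟨_, _, _, hi⟩
  · exact h x hx
  · exact hi

theorem iterGrowB_stable (inp : PySem.Set (Int × Int)) (S : PySem.Set (Int × Int))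
    (h : growB inp S = S) : ∀ k, iterGrowB inp k S = S := by
  intro k
  induction k with
  | zero => rfl
  | succ k ih => simp only [iterGrowB, h]; exact ih

theorem iterGrowB_add (inp : PySem.Set (Int × Int)) :
    ∀ (a b : Nat) (S : PySem.Set (Int × Int)),
      iterGrowB inp b (iterGrowB inp a S) = iterGrowB inp (a + b) S := by
  intro a
  induction a with
  | zero => intro b S; rw [Nat.zero_add]; rfl
  | succ a ih =>
    intro b S
    have : a + 1 + b = (a + b) + 1 := by omega
    rw [this]
    simp only [iterGrowB]
    exact ih b (growB inp S)

theorem prefix_iterGrowB (inp : PySem.Set (Int × Int)) :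
    ∀ (k : Nat) (S : PySem.Set (Int × Int)), S <+: iterGrowB inp k S := by
  intro k
  induction k with
  | zero => intro S; exact List.prefix_refl S
  | succ k ih =>
    intro S
    exact List.IsPrefix.trans (prefix_growB inp S) (ih _)

theorem nodup_iterGrowB (inp : PySem.Set (Int × Int)) :
    ∀ (k : Nat) (S : PySem.Set (Int × Int)), S.Nodup → (iterGrowB inp k S).Nodup := by
  intro k
  induction k with
  | zero => intro S h; exact h
  | succ k ih => intro S h; exact ih _ (nodup_growB inp S h)

theorem subset_iterGrowB (inp : PySem.Set (Int × Int)) :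
    ∀ (k : Nat) (S : PySem.Set (Int × Int)), (∀ x ∈ S, x ∈ inp) →
      ∀ x ∈ iterGrowB inp k S, x ∈ inp := by
  intro k
  induction k with
  | zero => intro S h; exact h
  | succ k ih => intro S h; exact ih _ (subset_growB inp S h)

theorem sound_iterGrowB (inp : PySem.Set (Int × Int)) (p0 : Int × Int) :
    ∀ (k : Nat) (S : PySem.Set (Int × Int)), (∀ x ∈ S, ReachHT inp p0 x) →
      ∀ x ∈ iterGrowB inp k S, ReachHT inp p0 x := by
  intro k
  induction k with
  | zero => intro S h; exact h
  | succ k ih =>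
    intro S h
    refine ih _ ?_
    intro x hx
    rcases (mem_growB inp S x).mp hx with hx | ⟨cell, hc, hn, hi⟩
    · exact h x hx
    · exact Relation.ReflTransGen.tail (h cell hc) ⟨hn, hi⟩

theorem len_iterGrowB (inp : PySem.Set (Int × Int)) :
    ∀ (k : Nat) (S : PySem.Set (Int × Int)),
      (∀ j < k, growB inp (iterGrowB inp j S) ≠ iterGrowB inp j S) →
      S.length + k ≤ (iterGrowB inp k S).length := by
  intro k
  induction k with
  | zero => intro S _; simp [iterGrowB]
  | succ k ih =>
    intro S h
    have h0 : growB inp S ≠ S := h 0 (by omega) 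
    have hlt : S.length < (growB inp S).length := by
      have hp := prefix_growB inp S
      have hle := hp.length_le
      rcases lt_or_eq_of_le hle with hlt | heq
      · exact hlt
      · exact absurd (hp.eq_of_length heq).symm h0
    have hstep : ∀ j < k, growB inp (iterGrowB inp j (growB inp S)) ≠ iterGrowB inp j (growB inp S) := by
      intro j hj
      have : iterGrowB inp j (growB inp S) = iterGrowB inp (j + 1) S := by
        have := iterGrowB_add inp 1 j S
        simpa [iterGrowB] using this
      rw [this]
      exact h (j + 1) (by omega)
    have := ih (growB inp S) hstep
    simp only [iterGrowB]
    omega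

theorem fix_iterGrowB (inp : PySem.Set (Int × Int)) (S : PySem.Set (Int × Int))
    (hS : S.Nodup) (hsub : ∀ x ∈ S, x ∈ inp) (hinp : inp.Nodup) (hlen : 1 ≤ S.length) :
    growB inp (iterGrowB inp inp.length S) = iterGrowB inp inp.length S := by
  by_cases hall : ∀ j < inp.length, growB inp (iterGrowB inp j S) ≠ iterGrowB inp j S
  · exfalso
    have h1 := len_iterGrowB inp inp.length S hall
    have h2 : (iterGrowB inp inp.length S).length ≤ inp.length := by
      have hnd := nodup_iterGrowB inp inp.length S hS
      have hsub' := subset_iterGrowB inp inp.length S hsub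
      have hsp : List.Subperm (iterGrowB inp inp.length S) inp :=
        List.subperm_of_subset hnd (fun x hx => hsub' x hx)
      exact hsp.length_le
    omega
  · push_neg at hall
    obtain ⟨j, hj, hfix⟩ := hall
    have hSn : iterGrowB inp inp.length S = iterGrowB inp j S := by
      have : iterGrowB inp inp.length S
          = iterGrowB inp (inp.length - j) (iterGrowB inp j S) := by
        rw [iterGrowB_add]
        congr 1
        omega
      rw [this, iterGrowB_stable inp _ hfix]
    rw [hSn, hfix]

theorem mem_comp_iff (inp : PySem.Set (Int × Int)) (p0 : Int × Int)
    (hinp : inp.Nodup) (hp0 : p0 ∈ inp) (x : Int × Int) :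
    x ∈ iterGrowB inp inp.length [p0] ↔ ReachHT inp p0 x := by
  have hfix := fix_iterGrowB inp [p0] (List.nodup_singleton p0)
    (by intro x hx; rcases List.mem_singleton.mp hx with rfl; exact hp0) hinp (by simp)
  constructor
  · intro hx
    refine sound_iterGrowB inp p0 inp.length [p0] ?_ x hx
    intro y hy
    rcases List.mem_singleton.mp hy with rfl
    exact Relation.ReflTransGen.refl
  · intro hr
    have hcl : ∀ u ∈ iterGrowB inp inp.length [p0], ∀ v, v ∈ nbrsHT u → v ∈ inp →
        v ∈ iterGrowB inp inp.length [p0] := by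
      intro u hu v hvn hvi
      have : v ∈ growB inp (iterGrowB inp inp.length [p0]) :=
        (mem_growB _ _ v).mpr (Or.inr ⟨u, hu, hvn, hvi⟩)
      rwa [hfix] at this
    have hp0m : p0 ∈ iterGrowB inp inp.length [p0] :=
      (prefix_iterGrowB inp inp.length [p0]).subset (List.mem_singleton_self p0)
    exact reach_closed inp _ hcl p0 x hp0m hr

-- count ≥ 3 over a nodup list ⟺ all three neighbours of the outside cell are in the list
theorem cnt3_iff (inp : PySem.Set (Int × Int)) (R : List (Int × Int)) (hR : R.Nodup)
    (c : Int × Int) (hc : c ∉ inp) :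
    3 ≤ cntHT inp R c ↔ ∀ v ∈ nbrsHT c, v ∈ R := by
  have hcnt : cntHT inp R c = (R.filter (fun v => decide (v ∈ nbrsHT c))).length := by
    rw [cntHT, ← List.countP_eq_length_filter]
    apply List.countP_congr
    intro v _
    simp [hc, nbr_symm c v]
  have hFnd : (R.filter (fun v => decide (v ∈ nbrsHT c))).Nodup := hR.filter _
  have hFsub : ∀ v ∈ R.filter (fun v => decide (v ∈ nbrsHT c)), v ∈ nbrsHT c := by
    intro v hv
    have := List.of_mem_filter hv
    simpa using this
  have hNlen : (nbrsHT c).length = 3 := by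
    simp only [nbrsHT, adjacent_eq]
    split <;> rfl
  constructor
  · intro h3 v hv
    rw [hcnt] at h3
    have hsp : List.Subperm (R.filter (fun v => decide (v ∈ nbrsHT c))) (nbrsHT c) :=
      List.subperm_of_subset hFnd hFsub
    have hle := hsp.length_le
    have hperm : (R.filter (fun v => decide (v ∈ nbrsHT c))).Perm (nbrsHT c) := by
      have heq : (R.filter (fun v => decide (v ∈ nbrsHT c))).length = (nbrsHT c).length := by
        omega
      exact hsp.perm_of_length_le (by omega)
    have : v ∈ R.filter (fun v => decide (v ∈ nbrsHT c)) := hperm.mem_iff.mpr hv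
    exact List.mem_of_mem_filter this
  · intro hall
    rw [hcnt]
    have hsub : ∀ v ∈ nbrsHT c, v ∈ R.filter (fun v => decide (v ∈ nbrsHT c)) := by
      intro v hv
      exact List.mem_filter.mpr ⟨hall v hv, by simpa using hv⟩
    have hsp : List.Subperm (nbrsHT c) (R.filter (fun v => decide (v ∈ nbrsHT c))) :=
      List.subperm_of_subset (nodup_nbrsHT c) hsub
    have := hsp.length_le
    omega

-- B's second phase ⟺ ∃ outside cell all of whose neighbours are in comp
theorem altScan_iff (inp comp : PySem.Set (Int × Int)) :
    (comp.any (fun cell => (adjacent cell).any (fun p =>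
        !inp.contains p.1 && (adjacent p.1).all (fun q => comp.contains q.1))) = true) ↔
      ∃ c, c ∉ inp ∧ ∀ v ∈ nbrsHT c, v ∈ comp := by
  constructor
  · intro h
    rcases List.any_eq_true.mp h with ⟨cell, hcell, hinner⟩
    rcases List.any_eq_true.mp hinner with ⟨p, hp, hcond⟩
    simp only [Bool.and_eq_true] at hcond
    obtain ⟨hout, hall⟩ := hcond
    refine ⟨p.1, ?_, ?_⟩
    · intro hmem
      have : inp.contains p.1 = true := by simpa [PySem.Set.contains] using hmem
      rw [this] at hout; cases hout
    · intro v hv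
      rcases List.mem_map.mp hv with ⟨q, hq, rfl⟩
      have := List.all_eq_true.mp hall q hq
      simpa [PySem.Set.contains] using this
  · rintro ⟨c, hcn, hall⟩
    have hcell : (c.1 + 1, c.2) ∈ nbrsHT c := by
      simp only [nbrsHT, adjacent_eq]
      split <;> simp
    have hcellm : (c.1 + 1, c.2) ∈ comp := hall _ hcell
    have hcnb : c ∈ nbrsHT (c.1 + 1, c.2) := (nbr_symm c (c.1 + 1, c.2)).mp hcell
    rcases List.mem_map.mp hcnb with ⟨p, hp, hpc⟩
    refine List.any_eq_true.mpr ⟨(c.1 + 1, c.2), hcellm, ?_⟩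
    refine List.any_eq_true.mpr ⟨p, hp, ?_⟩
    simp only [Bool.and_eq_true]
    refine ⟨?_, ?_⟩
    · rw [hpc]
      simp [PySem.Set.contains, hcn]
    · refine List.all_eq_true.mpr ?_
      intro q hq
      have hqn : q.1 ∈ nbrsHT p.1 := List.mem_map.mpr ⟨q, hq, rfl⟩
      rw [hpc] at hqn
      have := hall _ hqn
      simpa [PySem.Set.contains] using this

-- ===== VERDICT (by name: the statement is the Claim_ definition above) =====
theorem has_triangular_hole_spec : Claim_equal_has_triangular_hole := by
  unfold Claim_equal_has_triangular_hole
  intro piece _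
  unfold Spec_has_triangular_hole
  match piece with
  | [] => rfl
  | p0 :: prest =>
    simp only [has_triangular_hole, has_triangular_hole_alt]
    set inp : PySem.Set (Int × Int) := PySem.Set.ofList ((p0 :: prest).map Prod.fst) with hinp
    have hstart : p0.1 ∈ inp := by
      rw [hinp]
      exact (PySem.Set.mem_ofList _ _).mpr (List.mem_map.mpr ⟨p0, List.mem_cons_self, rfl⟩)
    have hinpnd : inp.Nodup := by rw [hinp]; exact PySem.Set.nodup_ofList _
    have hT : InvT inp [] [p0.1] := by
      refine ⟨List.nodup_nil, List.nodup_singleton _, ?_, ?_, ?_, ?_⟩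
      · intro x hx; rcases List.mem_singleton.mp hx with rfl; exact hstart
      · intro x _ hx; cases hx
      · intro x hx; cases hx
      · intro u hu; cases hu
    have hfilter : inp.filter (fun x => decide (x ∉ ([] : List (Int × Int)))) = inp :=
      List.filter_eq_self.mpr (by intro a _; simp)
    have hfA : (inp.filter (fun x => decide (x ∉ ([] : List (Int × Int))))).length
        < inp.length + 1 := by rw [hfilter]; omega
    have hS : InvS inp [] PySem.Dict.empty := by
      constructor
      · intro c _; simp [PySem.Dict.getD_empty, cntHT]
      · intro c _; simp [cntHT]
    have hA := loopA_true_iff inp (inp.length + 1) [] [p0.1] PySem.Dict.empty hT hS hfA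
    have hAm := travA_mem inp (inp.length + 1) [] [p0.1] hT hfA
    have hAnd := travA_nodup inp (inp.length + 1) [] [p0.1] hT
    have hAmem : ∀ x, x ∈ travA inp (inp.length + 1) [] [p0.1] ↔ ReachHT inp p0.1 x := by
      intro x
      rw [hAm x]
      constructor
      · rintro (hx | ⟨e, he, hr⟩)
        · cases hx
        · rcases List.mem_singleton.mp he with rfl; exact hr
      · intro hr; exact Or.inr ⟨p0.1, List.mem_singleton_self _, hr⟩
    have hBmem := mem_comp_iff inp p0.1 hinpnd hstart
    have hB := altScan_iff inp (iterGrowB inp inp.length [p0.1])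
    rw [Bool.eq_iff_iff,
      show (PySem.Set.empty : PySem.Set (Int × Int)).add p0.1 = [p0.1] from rfl,
      show (PySem.Set.empty : PySem.Set (Int × Int)) = [] from rfl, hA, hB]
    constructor
    · rintro ⟨c, hcn, h3⟩
      refine ⟨c, hcn, ?_⟩
      intro v hv
      have := (cnt3_iff inp _ hAnd c hcn).mp h3 v hv
      exact (hBmem v).mpr ((hAmem v).mp this)
    · rintro ⟨c, hcn, hall⟩
      refine ⟨c, hcn, ?_⟩
      refine (cnt3_iff inp _ hAnd c hcn).mpr ?_
      intro v hv
      exact (hAmem v).mpr ((hBmem v).mp (hall v hv))
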